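-- pv_equiv track=rewrite | github.com/gdamdam/textStep | scripts/convert_mpump_presets.py | convert_drum_pattern
-- ===== SOURCE A (Python) =====
-- MIDI_TO_TRACK = {
--     36: 0,  # Kick
--     38: 1,  # Snare
--     42: 2,  # CHH (Closed Hi-Hat)
--     46: 3,  # OHH (Open Hi-Hat)
--     51: 4,  # Ride Cymbal
--     56: 4,  # Cowbell (GM) → Ride (closest match)
--     50: 5,  # High Tom → Clap
--     49: 5,  # Crash Cymbal → Clap
--     37: 6,  # Side Stick / Rimshot → Cowbell
--     47: 7,  # Low-Mid Tom → Tom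
-- }
--
-- def steps_to_hex(steps_32):
--     """Convert 32-element bool list to 8-char hex string."""
--     hex_str = ''
--     for i in range(0, 32, 4):
--         nibble = 0
--         for j in range(4):
--             if i + j < len(steps_32) and steps_32[i + j]:
--                 nibble |= (8 >> j)
--         hex_str += format(nibble, 'x')
--     return hex_str
--
-- def convert_drum_pattern(pattern_16):
--     """Convert mpump 16-step drum pattern to 8 hex strings (tiled to 32 steps)."""
--     tracks = [[False] * 32 for _ in range(8)]
--
--     for step_idx, step_hits in enumerate(pattern_16):
--         if not step_hits:
--             continue
--         for hit in step_hits: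
--             midi_note = hit['note']
--             track = MIDI_TO_TRACK.get(midi_note)
--             if track is not None:
--                 # Tile: step_idx maps to both step_idx and step_idx+16
--                 tracks[track][step_idx] = True
--                 tracks[track][step_idx + 16] = True
--
--     return [steps_to_hex(t) for t in tracks]
-- ===== SOURCE B (Python) =====
-- MIDI_TO_TRACK = {
--     36: 0,  # Kick
--     38: 1,  # Snare
--     42: 2,  # CHH (Closed Hi-Hat)
--     46: 3,  # OHH (Open Hi-Hat)
--     51: 4,  # Ride Cymbal
--     56: 4,  # Cowbell (GM) -> Ride (closest match)
--     50: 5,  # High Tom -> Clap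
--     49: 5,  # Crash Cymbal -> Clap
--     37: 6,  # Side Stick / Rimshot -> Cowbell
--     47: 7,  # Low-Mid Tom -> Tom
-- }
--
-- def convert_drum_pattern(pattern_16):
--     """Convert mpump 16-step drum pattern to 8 hex strings (tiled to 32 steps)."""
--     out = []
--     for track in range(8):
--         bits = 0
--         for i in range(16):
--             step_hits = pattern_16[i] if i < len(pattern_16) else []
--             hit = any(MIDI_TO_TRACK.get(h['note']) == track for h in step_hits)
--             bits = bits * 2 + (1 if hit else 0)
--         half = format(bits, '04x')
--         out.append(half + half)
--     return out
-- ===== Notes on version B (the rewrite author's own statement) =====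
-- stated objective: simpler
-- what changed: B drops A's eight mutable 32-slot boolean rows and its steps_to_hex nibble loop: per track it builds one 16-bit integer in a single Horner pass over the first 16 steps and formats it once with format(bits,'04x'), emitting the 4-digit half twice since the 32-step pattern is just the 16-step pattern tiled.
import Mathlib
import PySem

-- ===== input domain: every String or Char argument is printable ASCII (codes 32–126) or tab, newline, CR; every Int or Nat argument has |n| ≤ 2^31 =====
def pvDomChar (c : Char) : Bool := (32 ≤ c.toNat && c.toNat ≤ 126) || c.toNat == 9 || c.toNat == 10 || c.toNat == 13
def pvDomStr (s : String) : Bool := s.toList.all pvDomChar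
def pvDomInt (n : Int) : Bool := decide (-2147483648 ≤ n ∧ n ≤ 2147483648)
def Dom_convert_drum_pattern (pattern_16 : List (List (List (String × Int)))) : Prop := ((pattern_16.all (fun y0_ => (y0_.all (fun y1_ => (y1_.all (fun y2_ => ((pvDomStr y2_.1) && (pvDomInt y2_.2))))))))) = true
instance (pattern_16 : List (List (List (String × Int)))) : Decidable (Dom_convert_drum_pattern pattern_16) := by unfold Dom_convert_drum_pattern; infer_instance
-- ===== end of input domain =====

-- B replaces A's eight mutable 32-slot boolean rows by one 16-bit accumulator per track, built in a
-- Horner pass over the first 16 steps, and emits each track's 4-hex-digit half twice (the 32-step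
-- pattern is the 16-step pattern tiled); objective: simpler.

-- ===== PORT A =====
-- module constant MIDI_TO_TRACK (dict int -> int; lookup = first match)
def MIDI_TO_TRACK : List (Int × Int) :=
  [(36,0),(38,1),(42,2),(46,3),(51,4),(56,4),(50,5),(49,5),(37,6),(47,7)]

-- format(n,'x') for 0 ≤ n < 16 (the only values A and B feed it); exact there
def hexChar (n : Nat) : Char :=
  ['0','1','2','3','4','5','6','7','8','9','a','b','c','d','e','f'].getD n '0'

-- literal port of A's steps_to_hex; the loop indices range(0,32,4)/range(4) and nibble are
-- nonnegative small ints, so Nat |||/>>> and j.toNat are exact; the guarded steps_32[i+j] is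
-- pyGetD, in range whenever its guard holds; += on the string is list append under String.ofList
def steps_to_hex (steps_32 : List Bool) : String :=
  String.ofList ((PySem.List.pyRange 0 32 4).foldl (fun hex_str i =>
    let nibble := (PySem.List.pyRange 0 4 1).foldl (fun nibble j =>
      if i + j < (steps_32.length : Int) && PySem.List.pyGetD steps_32 (i + j) false then
        nibble ||| (8 >>> j.toNat)
      else nibble) (0 : Nat)
    hex_str ++ [hexChar nibble]) [])

-- body of A's inner `for hit in step_hits` loop; hit['note'] raises KeyError when the key is
-- missing and tracks[track][step_idx+16] raises IndexError when step_idx+16 ≥ 32 — both excluded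
-- by Pre_ below (there this port is a no-op resp. a clamped pySetD instead)
def applyHit (step_idx : Int) (tracks : List (List Bool)) (hit : List (String × Int)) : List (List Bool) :=
  match hit.lookup "note" with
  | none => tracks
  | some midi_note =>
    match MIDI_TO_TRACK.lookup midi_note with
    | none => tracks
    | some track =>
      PySem.List.pySetD tracks track
        (PySem.List.pySetD (PySem.List.pySetD (PySem.List.pyGetD tracks track []) step_idx true)
          (step_idx + 16) true)

def convert_drum_pattern (pattern_16 : List (List (List (String × Int)))) : List String :=
  let tracks := List.replicate 8 (List.replicate 32 false)
  let tracks := (PySem.List.enumerate pattern_16).foldl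
    (fun tracks p => if p.2 = [] then tracks else p.2.foldl (applyHit p.1) tracks) tracks
  tracks.map steps_to_hex

-- ===== PORT B =====
-- MIDI_TO_TRACK.get(h['note']) == track (None == track is False for an int track); h['note']
-- raises KeyError when missing — excluded by Pre_ (this port yields False there)
def hitB (track : Int) (h : List (String × Int)) : Bool :=
  match h.lookup "note" with
  | none => false
  | some midi_note => MIDI_TO_TRACK.lookup midi_note == some track

-- format(bits,'04x') for 0 ≤ bits < 2^16 (the only values B feeds it); exact there
def hex4 (bits : Nat) : List Char :=
  [hexChar (bits / 4096 % 16), hexChar (bits / 256 % 16), hexChar (bits / 16 % 16), hexChar (bits % 16)]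

-- bits is a nonnegative Python int (< 2^16), so Nat arithmetic is exact; half + half is list
-- concatenation of the two 4-char halves under String.ofList
def convert_drum_pattern_alt (pattern_16 : List (List (List (String × Int)))) : List String :=
  (PySem.List.pyRange 0 8 1).foldl (fun out track =>
    let bits := (PySem.List.pyRange 0 16 1).foldl (fun bits i =>
      let step_hits := if i < (pattern_16.length : Int) then PySem.List.pyGetD pattern_16 i [] else []
      bits * 2 + (if step_hits.any (hitB track) then 1 else 0)) (0 : Nat)
    out ++ [String.ofList (hex4 bits ++ hex4 bits)]) []

-- ===== PRECONDITION & SPEC =====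
def trackOfHit (h : List (String × Int)) : Option Int :=
  match h.lookup "note" with
  | none => none
  | some n => MIDI_TO_TRACK.lookup n

-- A raises KeyError on any hit without a 'note' key, and IndexError when a hit at a step index
-- ≥ 16 has a note that maps to a track (it writes position step_idx+16 ≥ 32); Pre_ excludes
-- exactly those inputs and nothing else.
def Pre_convert_drum_pattern (pattern_16 : List (List (List (String × Int)))) : Prop :=
  (∀ step ∈ pattern_16, ∀ h ∈ step, (h.lookup "note").isSome = true) ∧
  (∀ step ∈ pattern_16.drop 16, ∀ h ∈ step, trackOfHit h = none)
instance (pattern_16 : List (List (List (String × Int)))) : Decidable (Pre_convert_drum_pattern pattern_16) := by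
  unfold Pre_convert_drum_pattern; infer_instance

def pvWitness_convert_drum_pattern : (List (List (List (String × Int)))) :=
  [[[("note", 36)]], [], [[("note", 38)], [("note", 40)]]]

def Spec_convert_drum_pattern (pattern_16 : List (List (List (String × Int)))) (out : List String) : Prop := out = convert_drum_pattern_alt pattern_16
instance (pattern_16 : List (List (List (String × Int)))) (out : List String) : Decidable (Spec_convert_drum_pattern pattern_16 out) := by unfold Spec_convert_drum_pattern; infer_instance

-- ===== CLAIM (what is proved, stated in full; the proofs are below) =====
def Claim_equal_convert_drum_pattern : Prop := ∀ (pattern_16 : List (List (List (String × Int)))), Dom_convert_drum_pattern pattern_16 → Pre_convert_drum_pattern pattern_16 → Spec_convert_drum_pattern pattern_16 (convert_drum_pattern pattern_16)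


-- ===== LEMMAS AND PROOFS =====
lemma lookup_MIDI_bounds {n t : Int} (h : MIDI_TO_TRACK.lookup n = some t) : 0 ≤ t ∧ t < 8 := by
  simp only [MIDI_TO_TRACK, List.lookup] at h
  repeat' split at h
  all_goals simp_all
  all_goals omega

lemma hitB_eq (k : Int) (h : List (String × Int)) : hitB k h = (trackOfHit h == some k) := by
  unfold hitB trackOfHit
  cases h.lookup "note" <;> simp

def getT (T : List (List Bool)) (k j : Nat) : Bool := (T.getD k []).getD j false
def Shape (T : List (List Bool)) : Prop := T.length = 8 ∧ ∀ r ∈ T, r.length = 32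

lemma getD_set {α : Type} (xs : List α) (a : Nat) (v : α) (j : Nat) (d : α) (ha : a < xs.length) :
    (xs.set a v).getD j d = if j = a then v else xs.getD j d := by
  by_cases hj : j < xs.length
  · simp only [List.getD, List.getElem?_set, ha]
    by_cases h1 : j = a
    · simp [h1]
    · rw [if_neg (fun h => h1 h.symm), if_neg h1]
  · rw [List.getD_eq_default _ _ (by omega : xs.length ≤ j),
      List.getD_eq_default _ _ (by simpa using (by omega : xs.length ≤ j))]
    rw [if_neg (by omega)]


lemma applyHit_shape (si : Int) (hsi : 0 ≤ si) (T : List (List Bool)) (h : List (String × Int))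
    (hT : Shape T) : Shape (applyHit si T h) := by
  unfold applyHit
  cases hl : h.lookup "note" with
  | none => exact hT
  | some n =>
    dsimp only
    cases hm : MIDI_TO_TRACK.lookup n with
    | none => exact hT
    | some t =>
      dsimp only
      obtain ⟨ht0, ht8⟩ := lookup_MIDI_bounds hm
      obtain ⟨hlen, hrows⟩ := hT
      rw [PySem.List.pySetD_of_nonneg _ _ ht0]
      constructor
      · simpa using hlen
      · intro r hr
        rcases List.mem_or_eq_of_mem_set hr with hr' | hr'
        · exact hrows r hr'
        · subst hr'
          rw [PySem.List.pySetD_of_nonneg _ _ (by omega), PySem.List.pySetD_of_nonneg _ _ hsi]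
          simp only [List.length_set]
          rw [PySem.List.pyGetD_eq_getElem _ _ ht0 (by omega)]
          exact hrows _ (List.getElem_mem _)

lemma getT_applyHit (si : Int) (hsi : 0 ≤ si) (T : List (List Bool)) (h : List (String × Int))
    (hT : Shape T) (k j : Nat) (hk : k < 8) (_hj : j < 32)
    (hok : trackOfHit h ≠ none → si < 16) :
    getT (applyHit si T h) k j
      = (getT T k j || (hitB (k : Int) h && (decide (si = (j : Int)) || decide (si + 16 = (j : Int))))) := by
  unfold applyHit hitB
  cases hl : h.lookup "note" with
  | none => simp
  | some n =>
    dsimp only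
    cases hm : MIDI_TO_TRACK.lookup n with
    | none => simp
    | some t =>
      dsimp only
      obtain ⟨ht0, ht8⟩ := lookup_MIDI_bounds hm
      have hsi16 : si < 16 := hok (by unfold trackOfHit; rw [hl]; dsimp only; rw [hm]; simp)
      obtain ⟨hlen, hrows⟩ := hT
      have hrow : (T.getD t.toNat []).length = 32 := by
        rw [List.getD_eq_getElem _ _ (by omega)]
        exact hrows _ (List.getElem_mem _)
      rw [PySem.List.pySetD_of_nonneg _ _ ht0, PySem.List.pySetD_of_nonneg _ _ (by omega : (0:Int) ≤ si + 16),
        PySem.List.pySetD_of_nonneg _ _ hsi, PySem.List.pyGetD_eq_getElem _ _ ht0 (by omega)]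
      unfold getT
      rw [getD_set _ _ _ _ _ (by omega : t.toNat < T.length)]
      have hgetel : T[t.toNat] = T.getD t.toNat [] := by
        rw [List.getD_eq_getElem _ _ (by omega)]
      by_cases hkt : k = t.toNat
      · subst hkt
        rw [if_pos rfl, ← hgetel]
        have hr : T[t.toNat].length = 32 := hrows _ (List.getElem_mem _)
        have hbeq : (some t == some ((t.toNat : Nat) : Int)) = true := by simp; omega
        rw [hbeq, Bool.true_and]
        rw [getD_set _ _ _ _ _ (show (si+16).toNat < (T[t.toNat].set si.toNat true).length by
              simp [hr]; omega),
            getD_set _ _ _ _ _ (show si.toNat < T[t.toNat].length by omega)]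
        by_cases h2 : si + 16 = (j:Int)
        · rw [if_pos (by omega)]; simp [h2]
        · rw [if_neg (by omega)]
          by_cases h1 : si = (j:Int)
          · rw [if_pos (by omega)]; simp [h1]
          · rw [if_neg (by omega)]; simp [h1, h2]
      · rw [if_neg hkt]
        have hbeq : (some t == some ((k:Nat) : Int)) = false := by simp; omega
        rw [hbeq]
        simp

lemma foldl_applyHit_shape (si : Int) (hsi : 0 ≤ si) (hs : List (List (String × Int)))
    (T : List (List Bool)) (hT : Shape T) : Shape (hs.foldl (applyHit si) T) := by
  induction hs generalizing T with
  | nil => exact hT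
  | cons h hs ih => exact ih _ (applyHit_shape si hsi T h hT)

lemma getT_foldl_applyHit (si : Int) (hsi : 0 ≤ si) (hs : List (List (String × Int)))
    (T : List (List Bool)) (hT : Shape T) (k j : Nat) (hk : k < 8) (hj : j < 32)
    (hok : ∀ h ∈ hs, trackOfHit h ≠ none → si < 16) :
    getT (hs.foldl (applyHit si) T) k j
      = (getT T k j || (hs.any (hitB (k : Int)) && (decide (si = (j : Int)) || decide (si + 16 = (j : Int))))) := by
  induction hs generalizing T with
  | nil => simp
  | cons h hs ih =>
    rw [List.foldl_cons, ih _ (applyHit_shape si hsi T h hT) (fun h' hm => hok h' (List.mem_cons_of_mem _ hm)),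
      getT_applyHit si hsi T h hT k j hk hj (hok h (List.mem_cons_self))]
    generalize (decide (si = (j:Int)) || decide (si + 16 = (j:Int))) = c
    cases c <;> simp [Bool.or_assoc]

def stepF (tracks : List (List Bool)) (p : Int × List (List (String × Int))) : List (List Bool) :=
  if p.2 = [] then tracks else p.2.foldl (applyHit p.1) tracks

lemma stepF_eq (T : List (List Bool)) (p : Int × List (List (String × Int))) :
    stepF T p = p.2.foldl (applyHit p.1) T := by
  rcases p with ⟨i, hs⟩
  cases hs <;> simp [stepF]

lemma getT_enum_fold (pat : List (List (List (String × Int)))) (s : Int) (hs : 0 ≤ s)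
    (T : List (List Bool)) (hT : Shape T) (k j : Nat) (hk : k < 8) (hj : j < 32)
    (hok : ∀ p ∈ PySem.List.enumerate pat s, 16 ≤ p.1 → ∀ h ∈ p.2, trackOfHit h = none) :
    getT ((PySem.List.enumerate pat s).foldl stepF T) k j
      = (getT T k j ||
          (PySem.List.enumerate pat s).any
            (fun p => p.2.any (hitB (k : Int)) && (decide (p.1 = (j : Int)) || decide (p.1 + 16 = (j : Int))))) := by
  induction pat generalizing s T with
  | nil => simp [PySem.List.enumerate]
  | cons x xs ih =>
    rw [PySem.List.enumerate_cons, List.foldl_cons, stepF_eq]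
    have hok0 : ∀ h ∈ x, trackOfHit h ≠ none → s < 16 := by
      intro h hm hne
      by_cases h16 : 16 ≤ s
      · exact absurd (hok (s, x) (by rw [PySem.List.enumerate_cons]; exact List.mem_cons_self) h16 h hm) hne
      · omega
    rw [ih (s+1) (by omega) _ (foldl_applyHit_shape s hs x T hT) (fun p hp h16 => hok p (by
          rw [PySem.List.enumerate_cons]; exact List.mem_cons_of_mem _ hp) h16),
      getT_foldl_applyHit s hs x T hT k j hk hj hok0]
    rw [List.any_cons]
    generalize ((PySem.List.enumerate xs (s+1)).any _) = rest
    generalize (decide (s = (j:Int)) || decide (s + 16 = (j:Int))) = c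
    cases c <;> cases rest <;> simp

lemma enum_any (pat : List (List (List (String × Int)))) (s : Int)
    (f : Int → List (List (String × Int)) → Bool) :
    (PySem.List.enumerate pat s).any (fun p => f p.1 p.2)
      = (List.range pat.length).any (fun i => f (s + (i : Int)) (pat.getD i [])) := by
  induction pat generalizing s with
  | nil => simp [PySem.List.enumerate]
  | cons x xs ih =>
    rw [PySem.List.enumerate_cons, List.any_cons, ih (s+1)]
    rw [List.length_cons, List.range_succ_eq_map, List.any_cons, List.any_map]
    simp only [List.getD_cons_zero]
    congr 1
    · norm_num
    · apply List.any_congr rfl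
      intro i
      congr 1
      push_cast
      ring

lemma G_eval (n : Nat) (g : Nat → Bool) (hg16 : ∀ i, 16 ≤ i → g i = false)
    (hgn : ∀ i, n ≤ i → g i = false) (j : Nat) (hj : j < 32) :
    (List.range n).any (fun i => g i && (decide (i = j) || decide (i + 16 = j)))
      = g (if j < 16 then j else j - 16) := by
  apply Bool.eq_iff_iff.mpr
  simp only [List.any_eq_true, List.mem_range, Bool.and_eq_true, Bool.or_eq_true,
    decide_eq_true_eq]
  constructor
  · rintro ⟨i, hin, hgi, hij | hij⟩
    · subst hij
      by_cases h16 : i < 16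
      · rw [if_pos h16]; exact hgi
      · exact absurd hgi (by simp [hg16 i (by omega)])
    · have h16 : ¬ j < 16 := by omega
      rw [if_neg h16]
      have : j - 16 = i := by omega
      rw [this]; exact hgi
  · intro hgj
    by_cases h16 : j < 16
    · rw [if_pos h16] at hgj
      have hn : j < n := by
        by_contra hn
        rw [hgn j (by omega)] at hgj; exact absurd hgj (by simp)
      exact ⟨j, hn, hgj, Or.inl rfl⟩
    · rw [if_neg h16] at hgj
      have hn : j - 16 < n := by
        by_contra hn
        rw [hgn _ (by omega)] at hgj; exact absurd hgj (by simp)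
      exact ⟨j - 16, hn, hgj, Or.inr (by omega)⟩

def bitsOf (g : Nat → Bool) : Nat :=
  (List.range 16).foldl (fun b i => b * 2 + (if g i then 1 else 0)) 0
def val4 (g : Nat → Bool) (a : Nat) : Nat :=
  8 * (if g (4*a) then 1 else 0) + 4 * (if g (4*a+1) then 1 else 0)
    + 2 * (if g (4*a+2) then 1 else 0) + (if g (4*a+3) then 1 else 0)

lemma bitsOf_eq (g : Nat → Bool) :
    bitsOf g = 4096 * val4 g 0 + 256 * val4 g 1 + 16 * val4 g 2 + val4 g 3 := by
  have h16 : List.range 16 = [0,1,2,3,4,5,6,7,8,9,10,11,12,13,14,15] := by rfl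
  simp only [bitsOf, val4, h16, List.foldl, Nat.reduceMul, Nat.reduceAdd]
  generalize (if g 0 = true then (1:Nat) else 0) = e0
  generalize (if g 1 = true then (1:Nat) else 0) = e1
  generalize (if g 2 = true then (1:Nat) else 0) = e2
  generalize (if g 3 = true then (1:Nat) else 0) = e3
  generalize (if g 4 = true then (1:Nat) else 0) = e4
  generalize (if g 5 = true then (1:Nat) else 0) = e5
  generalize (if g 6 = true then (1:Nat) else 0) = e6
  generalize (if g 7 = true then (1:Nat) else 0) = e7
  generalize (if g 8 = true then (1:Nat) else 0) = e8
  generalize (if g 9 = true then (1:Nat) else 0) = e9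
  generalize (if g 10 = true then (1:Nat) else 0) = e10
  generalize (if g 11 = true then (1:Nat) else 0) = e11
  generalize (if g 12 = true then (1:Nat) else 0) = e12
  generalize (if g 13 = true then (1:Nat) else 0) = e13
  generalize (if g 14 = true then (1:Nat) else 0) = e14
  generalize (if g 15 = true then (1:Nat) else 0) = e15
  ring

lemma val4_lt (g : Nat → Bool) (a : Nat) : val4 g a < 16 := by
  unfold val4
  rcases g (4*a) <;> rcases g (4*a+1) <;> rcases g (4*a+2) <;> rcases g (4*a+3) <;> norm_num

lemma digit0 (g : Nat → Bool) : bitsOf g / 4096 % 16 = val4 g 0 := by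
  rw [bitsOf_eq]
  have h0 := val4_lt g 0; have h1 := val4_lt g 1; have h2 := val4_lt g 2; have h3 := val4_lt g 3
  omega
lemma digit1 (g : Nat → Bool) : bitsOf g / 256 % 16 = val4 g 1 := by
  rw [bitsOf_eq]
  have h0 := val4_lt g 0; have h1 := val4_lt g 1; have h2 := val4_lt g 2; have h3 := val4_lt g 3
  omega
lemma digit2 (g : Nat → Bool) : bitsOf g / 16 % 16 = val4 g 2 := by
  rw [bitsOf_eq]
  have h0 := val4_lt g 0; have h1 := val4_lt g 1; have h2 := val4_lt g 2; have h3 := val4_lt g 3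
  omega
lemma digit3 (g : Nat → Bool) : bitsOf g % 16 = val4 g 3 := by
  rw [bitsOf_eq]
  have h0 := val4_lt g 0; have h1 := val4_lt g 1; have h2 := val4_lt g 2; have h3 := val4_lt g 3
  omega

lemma tower_eval (b0 b1 b2 b3 : Bool) :
    (if b3 = true then
        (if b2 = true then
            (if b1 = true then (if b0 = true then 8 else 0) ||| 8 >>> 1 else if b0 = true then 8 else 0) |||
              8 >>> Int.toNat 2
          else if b1 = true then (if b0 = true then 8 else 0) ||| 8 >>> 1 else if b0 = true then 8 else 0) |||
          8 >>> Int.toNat 3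
      else
        if b2 = true then
          (if b1 = true then (if b0 = true then 8 else 0) ||| 8 >>> 1 else if b0 = true then 8 else 0) |||
            8 >>> Int.toNat 2
        else if b1 = true then (if b0 = true then 8 else 0) ||| 8 >>> 1 else if b0 = true then 8 else 0 : Nat)
    = 8 * (if b0 then 1 else 0) + 4 * (if b1 then 1 else 0) + 2 * (if b2 then 1 else 0) + (if b3 then 1 else 0) := by
  cases b0 <;> cases b1 <;> cases b2 <;> cases b3 <;> decide

lemma crux (g : Nat → Bool) :
    steps_to_hex ((List.range 32).map (fun j => if j < 16 then g j else g (j - 16)))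
      = String.ofList (hex4 (bitsOf g) ++ hex4 (bitsOf g)) := by
  have h32 : (List.range 32).map (fun j => if j < 16 then g j else g (j - 16))
      = [g 0, g 1, g 2, g 3, g 4, g 5, g 6, g 7, g 8, g 9, g 10, g 11, g 12, g 13, g 14, g 15,
         g 0, g 1, g 2, g 3, g 4, g 5, g 6, g 7, g 8, g 9, g 10, g 11, g 12, g 13, g 14, g 15] := by
    have : List.range 32 = [0,1,2,3,4,5,6,7,8,9,10,11,12,13,14,15,16,17,18,19,20,21,22,23,24,25,26,27,28,29,30,31] := by rfl
    rw [this]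
    norm_num
  rw [h32]
  have hr1 : PySem.List.pyRange 0 32 4 = [0,4,8,12,16,20,24,28] := by decide
  have hr2 : PySem.List.pyRange 0 4 1 = [0,1,2,3] := by decide
  unfold steps_to_hex
  rw [hr1, hr2]
  simp only [List.foldl, List.length_cons, List.length_nil, Nat.reduceAdd, Int.reduceAdd]
  norm_num [PySem.List.pyGetD_ofNat', List.getD_eq_getElem?_getD, List.getElem?_cons_succ, List.getElem?_cons_zero]
  simp only [tower_eval]
  simp only [hex4, digit0, digit1, digit2, digit3, val4, Nat.reduceMul, Nat.reduceAdd]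
  rw [← String.ofList_append]
  simp only [List.cons_append, List.nil_append]


-- glue lemmas, appended to main file before VERDICT
lemma getD_mem_drop (pat : List (List (List (String × Int)))) (i : Nat) (h16 : 16 ≤ i)
    (hi : i < pat.length) : pat.getD i [] ∈ pat.drop 16 := by
  rw [List.getD_eq_getElem _ _ hi]
  have h : pat[i] = (pat.drop 16)[i - 16]'(by simp; omega) := by
    rw [List.getElem_drop]
    congr 1
    omega
  rw [h]
  exact List.getElem_mem _

lemma mem_enumerate (pat : List (List (List (String × Int)))) (s : Int) :
    ∀ p ∈ PySem.List.enumerate pat s, ∃ i : Nat, i < pat.length ∧ p.1 = s + i ∧ p.2 = pat.getD i [] := by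
  induction pat generalizing s with
  | nil => simp [PySem.List.enumerate]
  | cons x xs ih =>
    intro p hp
    rw [PySem.List.enumerate_cons] at hp
    rcases List.mem_cons.mp hp with rfl | hp
    · exact ⟨0, by simp⟩
    · obtain ⟨i, hi, h1, h2⟩ := ih (s + 1) p hp
      refine ⟨i + 1, by simpa using Nat.succ_lt_succ hi, by push_cast; omega, by simpa using h2⟩

lemma enum_fold_shape (pat : List (List (List (String × Int)))) (s : Int) (hs : 0 ≤ s)
    (T : List (List Bool)) (hT : Shape T) :
    Shape ((PySem.List.enumerate pat s).foldl stepF T) := by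
  induction pat generalizing s T with
  | nil => simpa [PySem.List.enumerate]
  | cons x xs ih =>
    rw [PySem.List.enumerate_cons, List.foldl_cons, stepF_eq]
    exact ih (s + 1) (by omega) _ (foldl_applyHit_shape s hs x T hT)

lemma bits_fold_eq (pat : List (List (List (String × Int)))) (t : Int) :
    (PySem.List.pyRange 0 16 1).foldl (fun bits i =>
        bits * 2 + (if (if i < (pat.length : Int) then PySem.List.pyGetD pat i [] else []).any (hitB t) then 1 else 0)) (0 : Nat)
      = bitsOf (fun i => (pat.getD i []).any (hitB t)) := by
  rw [PySem.List.pyRange_one, List.foldl_map, show ((16:Int) - 0).toNat = 16 by decide]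
  unfold bitsOf
  congr 1
  funext b i
  have h : (if ((0:Int) + ↑i) < (pat.length : Int) then PySem.List.pyGetD pat ((0:Int) + ↑i) [] else [])
      = pat.getD i [] := by
    simp only [zero_add]
    by_cases hi : (↑i : Int) < (pat.length : Int)
    · rw [if_pos hi, PySem.List.pyGetD_natCast]
    · rw [if_neg hi]
      exact (List.getD_eq_default _ _ (by omega)).symm
  rw [h]

lemma alt_eq (pat : List (List (List (String × Int)))) :
    convert_drum_pattern_alt pat
      = (List.range 8).map (fun (k : Nat) => String.ofList
          (hex4 (bitsOf (fun i => (pat.getD i []).any (hitB (k : Int))))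
            ++ hex4 (bitsOf (fun i => (pat.getD i []).any (hitB (k : Int)))))) := by
  simp only [convert_drum_pattern_alt]
  simp only [bits_fold_eq pat]
  rw [PySem.List.foldl_append_singleton_eq_map
      (fun (track : Int) => String.ofList
        (hex4 (bitsOf (fun i => (pat.getD i []).any (hitB track)))
          ++ hex4 (bitsOf (fun i => (pat.getD i []).any (hitB track)))))]
  rw [List.nil_append, show PySem.List.pyRange 0 8 1 = [0,1,2,3,4,5,6,7] by decide,
    show List.range 8 = [0,1,2,3,4,5,6,7] from rfl]
  norm_num

-- ===== VERDICT (by name: the statement is the Claim_ definition above) =====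
lemma getT_eq (T : List (List Bool)) (k j : Nat) (h1 : k < T.length) (h2 : j < (T[k]'h1).length) :
    getT T k j = (T[k]'h1)[j]'h2 := by
  unfold getT
  have e1 : T.getD k [] = T[k]'h1 := List.getD_eq_getElem T [] h1
  rw [e1, List.getD_eq_getElem _ false h2]

theorem convert_drum_pattern_spec : Claim_equal_convert_drum_pattern := by
  intro pat _ hPre
  obtain ⟨hkey, hdrop⟩ := hPre
  unfold Spec_convert_drum_pattern
  have hg16 : ∀ (k : Nat) (i : Nat), 16 ≤ i → ((pat.getD i []).any (hitB (k : Int))) = false := by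
    intro k i h16
    by_cases hlen : i < pat.length
    · apply List.any_eq_false.mpr
      intro h hh
      rw [hitB_eq, hdrop _ (getD_mem_drop pat i h16 hlen) h hh]
      simp
    · rw [List.getD_eq_default _ _ (by omega)]
      rfl
  have hgn : ∀ (k : Nat) (i : Nat), pat.length ≤ i → ((pat.getD i []).any (hitB (k : Int))) = false := by
    intro k i hi
    rw [List.getD_eq_default _ _ hi]
    rfl
  unfold convert_drum_pattern
  rw [show (fun (tracks : List (List Bool)) (p : Int × List (List (String × Int))) =>
        if p.2 = [] then tracks else p.2.foldl (applyHit p.1) tracks) = stepF from rfl]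
  have hshape0 : Shape (List.replicate 8 (List.replicate 32 false)) := by
    refine ⟨by simp, ?_⟩
    intro r hr
    rw [List.eq_of_mem_replicate hr]
    simp
  have hok : ∀ p ∈ PySem.List.enumerate pat 0, 16 ≤ p.1 → ∀ h ∈ p.2, trackOfHit h = none := by
    intro p hp h16 h hh
    obtain ⟨i, hi, h1, h2⟩ := mem_enumerate pat 0 p hp
    have hi16 : 16 ≤ i := by omega
    rw [h2] at hh
    exact hdrop _ (getD_mem_drop pat i hi16 hi) h hh
  have hshape : Shape ((PySem.List.enumerate pat 0).foldl stepF (List.replicate 8 (List.replicate 32 false))) :=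
    enum_fold_shape pat 0 (by norm_num) _ hshape0
  have hrow : ∀ (k j : Nat), k < 8 → j < 32 →
      getT ((PySem.List.enumerate pat 0).foldl stepF (List.replicate 8 (List.replicate 32 false))) k j
        = (if j < 16 then (pat.getD j []).any (hitB (k : Int)) else (pat.getD (j - 16) []).any (hitB (k : Int))) := by
    intro k j hk hj
    rw [getT_enum_fold pat 0 (by norm_num) _ hshape0 k j hk hj hok]
    have h0 : getT (List.replicate 8 (List.replicate 32 false)) k j = false := by
      rw [getT_eq _ k j (by simpa using hk) (by simp only [List.getElem_replicate, List.length_replicate]; exact hj)]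
      simp only [List.getElem_replicate]
    rw [h0, Bool.false_or]
    rw [enum_any pat 0 (fun a b => b.any (hitB (k : Int)) && (decide (a = (j : Int)) || decide (a + 16 = (j : Int))))]
    rw [List.any_congr rfl (fun i => by
      rw [show decide ((0 : Int) + (i : Int) = (j : Int)) = decide (i = j) from decide_eq_decide.mpr (by omega),
        show decide ((0 : Int) + (i : Int) + 16 = (j : Int)) = decide (i + 16 = j) from decide_eq_decide.mpr (by omega)])]
    rw [G_eval pat.length (fun i => (pat.getD i []).any (hitB (k : Int))) (hg16 k) (hgn k) j hj]
    exact apply_ite (fun i => (pat.getD i []).any (hitB (k : Int))) (j < 16) j (j - 16)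
  have hTlist : (PySem.List.enumerate pat 0).foldl stepF (List.replicate 8 (List.replicate 32 false))
      = (List.range 8).map (fun (k : Nat) => (List.range 32).map (fun (j : Nat) =>
          if j < 16 then (pat.getD j []).any (hitB (k : Int)) else (pat.getD (j - 16) []).any (hitB (k : Int)))) := by
    apply List.ext_getElem
    · simp only [List.length_map]
      exact hshape.1
    · intro k h1 h2
      simp only [List.getElem_map]
      have hk8 : k < 8 := lt_of_lt_of_eq h1 hshape.1
      apply List.ext_getElem
      · simpa using hshape.2 _ (List.getElem_mem h1)
      · intro j hj1 hj2
        have hj32 : j < 32 := by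
          have := hshape.2 _ (List.getElem_mem h1)
          omega
        have hr := hrow k j hk8 hj32
        rw [getT_eq _ k j h1 hj1] at hr
        rw [hr]
        simp
  show (List.foldl stepF (List.replicate 8 (List.replicate 32 false)) (PySem.List.enumerate pat)).map steps_to_hex
      = convert_drum_pattern_alt pat
  rw [hTlist, List.map_map, alt_eq pat]
  apply List.map_congr_left
  intro k _
  exact crux (fun i => (pat.getD i []).any (hitB (k : Int)))
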